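-- pv_equiv track=rewrite | github.com/thomas-xin/Miza | smath.py | sub_dict
-- ===== SOURCE A (Python) =====
-- def sub_dict(d, key):
--     output = dict(d)
--     try:
--         key[0]
--     except TypeError:
--         key = [key]
--     for k in key:
--         output.pop(k, None)
--     return output
-- ===== SOURCE B (Python) =====
-- def sub_dict(d, key):
--     removed = set(key)
--     return {k: v for k, v in dict(d).items() if k not in removed}
-- ===== Notes on version B (the rewrite author's own statement) =====
-- stated objective: simpler
-- what changed: Instead of copying the dict and popping each removal key from the copy, B builds a set of the keys to remove once and returns a dict comprehension over the items filtered by set membership (iterates the dict, not the key list).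
import Mathlib
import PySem

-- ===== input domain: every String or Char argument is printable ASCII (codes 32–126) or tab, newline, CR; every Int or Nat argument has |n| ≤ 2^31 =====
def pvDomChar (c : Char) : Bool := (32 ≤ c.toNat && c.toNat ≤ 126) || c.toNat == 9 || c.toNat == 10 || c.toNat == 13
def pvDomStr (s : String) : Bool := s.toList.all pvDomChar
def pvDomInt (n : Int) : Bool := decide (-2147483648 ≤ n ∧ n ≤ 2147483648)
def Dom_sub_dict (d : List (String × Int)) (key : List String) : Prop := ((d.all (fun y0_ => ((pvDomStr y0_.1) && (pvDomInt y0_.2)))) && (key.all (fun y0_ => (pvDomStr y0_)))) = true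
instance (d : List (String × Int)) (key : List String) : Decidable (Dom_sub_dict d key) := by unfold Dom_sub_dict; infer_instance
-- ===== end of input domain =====

-- B replaces the pop-each-key loop on a dict copy with one set of removal keys and a
-- filtering comprehension over the dict's items (simpler decomposition; same cost).

-- ===== PORT A =====
-- output = dict(d); for k in key: output.pop(k, None); return output
-- (the 'try: key[0] except TypeError' normalization is the identity on a non-empty
--  list argument; on key = [] Python raises IndexError — excluded by Pre_)
def sub_dict (d : List (String × Int)) (key : List String) : List (String × Int) :=
  (key.foldl (fun output k =>
      match output.pop? k with          -- output.pop(k, None)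
      | some (_, o') => o'
      | none => output)
    (PySem.Dict.ofList d)).items

-- ===== PORT B =====
-- removed = set(key); return {k: v for k, v in dict(d).items() if k not in removed}
def sub_dict_alt (d : List (String × Int)) (key : List String) : List (String × Int) :=
  let removed : PySem.Set String := PySem.Set.ofList key
  (PySem.Dict.ofList d).items.filter (fun p => !(PySem.Set.contains removed p.1))

-- ===== PRECONDITION & SPEC =====
-- Pre_ excludes only key = [], where Python A raises IndexError ('key[0]' is guarded
-- against TypeError only).
def Pre_sub_dict (d : List (String × Int)) (key : List String) : Prop := key ≠ []
instance (d : List (String × Int)) (key : List String) : Decidable (Pre_sub_dict d key) := by unfold Pre_sub_dict; infer_instance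
def pvWitness_sub_dict : (List (String × Int)) × List String := ([("a", 1), ("b", 2)], ["b", "x"])

def Spec_sub_dict (d : List (String × Int)) (key : List String) (out : List (String × Int)) : Prop := out = sub_dict_alt d key
instance (d : List (String × Int)) (key : List String) (out : List (String × Int)) : Decidable (Spec_sub_dict d key out) := by unfold Spec_sub_dict; infer_instance

-- ===== CLAIM (what is proved, stated in full; the proofs are below) =====
def Claim_equal_sub_dict : Prop := ∀ (d : List (String × Int)) (key : List String), Dom_sub_dict d key → Pre_sub_dict d key → Spec_sub_dict d key (sub_dict d key)

-- ===== LEMMAS AND PROOFS =====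

-- One pop-with-default step filters its key out of the items list.
theorem pop_step_items (o : PySem.Dict String Int) (k : String) :
    (match o.pop? k with
      | some (_, o') => o'
      | none => o).items = o.items.filter (fun p => !(p.1 == k)) := by
  simp only [PySem.Dict.pop?]
  cases hg : o.get? k with
  | some v => simp [PySem.Dict.erase]
  | none =>
    simp only [Option.map_none]
    rw [eq_comm]
    apply List.filter_eq_self.mpr
    intro p hp
    have hk : k ∉ o.keys := (PySem.Dict.get?_eq_none_iff_not_mem_keys o k).mp hg
    have : p.1 ∈ o.keys := PySem.Dict.mem_keys_of_mem_items o hp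
    simp only [Bool.not_eq_eq_eq_not, Bool.not_true, beq_eq_false_iff_ne, ne_eq]
    intro h; exact hk (h ▸ this)

-- The whole pop loop over `key` filters the items by non-membership in `key`.
theorem pop_loop_items (key : List String) (o : PySem.Dict String Int) :
    (key.foldl (fun output k =>
      match output.pop? k with
      | some (_, o') => o'
      | none => output) o).items
    = o.items.filter (fun p => !(key.contains p.1)) := by
  induction key generalizing o with
  | nil => simp
  | cons k ks ih =>
    simp only [List.foldl_cons]
    rw [ih, pop_step_items, List.filter_filter]
    apply List.filter_congr
    intro p _
    simp only [List.contains_cons]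
    cases p.1 == k <;> simp

theorem sub_dict_spec : Claim_equal_sub_dict := by
  intro d key _ _
  unfold Spec_sub_dict sub_dict sub_dict_alt
  rw [pop_loop_items]
  apply List.filter_congr
  intro p _
  simp [PySem.Set.contains_eq_listContains, List.contains_eq_mem]

-- ===== VERDICT (by name: the statement is the Claim_ definition above) =====
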